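-- pv_equiv track=rewrite | github.com/qiuyue97/ParkSearcher | baidu_api.py | circle_generator
-- ===== SOURCE A (Python) =====
-- def circle_generator(x_min, x_max, y_min, y_max, radius=1000):
--     """
--     生成器函数，按需生成圆的中心点和位置（上或下）。
--
--     参数:
--     - x_min, x_max, y_min, y_max: 矩形参数。
--     - radius: 圆的半径。
--
--     返回:
--     - 生成下一个圆的中心坐标和位置。
--     """
--     start_x = x_min
--     start_y = y_max - 1
--     x = start_x
--     y = start_y
--     position = 'down'
--
--     while True:
--         yield x, y, position
--         if x >= x_max:
--             # 当前行点已超出范围，另起一行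
--             next_x = x_min
--             next_y = y - radius * (3 if position == 'up' else 2)
--             next_position = 'down'
--             if next_y <= y_min - 2 * radius:
--                 # 下一个y超出范围，结束
--                 break
--         else:
--             if position == 'down':
--                 next_x = x + radius
--                 next_y = y + radius
--                 next_position = 'up'
--             else:
--                 next_x = x + radius
--                 next_y = y - radius
--                 next_position = 'down'
--
--         # 更新当前坐标和位置，准备生成下一个圆的信息
--         x, y, position = next_x, next_y, next_position
-- ===== SOURCE B (Python) =====
-- def circle_generator(x_min, x_max, y_min, y_max, radius=1000):
--     """Same grid of circle centers as A, written as explicit nested row/column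
--     loops: the row step collapses to 2*radius in both wrap cases, and the
--     up/down position is just the parity of the column index."""
--     row_start = y_max - 1
--     while True:  # rows (the first row always runs)
--         x = x_min
--         k = 0
--         while True:  # columns within the row
--             if k % 2 == 0:
--                 yield x, row_start, 'down'
--             else:
--                 yield x, row_start + radius, 'up'
--             if x >= x_max:
--                 break
--             x += radius
--             k += 1
--         if row_start <= y_min:
--             break
--         row_start -= 2 * radius
-- ===== Notes on version B (the rewrite author's own statement) =====
-- stated objective: simpler
-- what changed: Replaces A's flat three-way state machine (x, y, position threaded across yields and wraps) with explicit nested row/column loops: the row step is derived to collapse to exactly 2*radius in both wrap cases and the up/down position becomes the parity of the column index.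
import Mathlib
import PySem

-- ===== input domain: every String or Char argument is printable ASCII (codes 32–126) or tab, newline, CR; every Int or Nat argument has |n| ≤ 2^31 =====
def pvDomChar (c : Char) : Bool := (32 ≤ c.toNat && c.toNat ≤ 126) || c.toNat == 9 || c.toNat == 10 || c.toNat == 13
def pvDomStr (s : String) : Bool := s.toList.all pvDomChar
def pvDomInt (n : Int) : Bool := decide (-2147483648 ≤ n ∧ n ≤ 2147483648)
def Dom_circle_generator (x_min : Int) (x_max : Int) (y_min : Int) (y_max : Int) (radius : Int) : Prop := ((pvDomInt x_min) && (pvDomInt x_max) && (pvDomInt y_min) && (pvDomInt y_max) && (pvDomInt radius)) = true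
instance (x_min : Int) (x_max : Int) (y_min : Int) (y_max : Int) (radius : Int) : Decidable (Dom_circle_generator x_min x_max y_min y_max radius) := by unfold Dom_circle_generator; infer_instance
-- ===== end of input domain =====

-- B rewrites A's flat (x, y, position) state machine as explicit nested row/column loops
-- (row step derived as exactly 2*radius, position = parity of the column index); simpler, same cost.
-- Both Pythons are generators; the equivalence is about the full yielded sequence, materialised as a list.
-- Both ports carry a fuel counter (one unit per yielded point) purely as a totality guard
-- (the Python generators are unbounded when radius ≤ 0): the proved equality holds for any
-- shared fuel, and the fuel is ample wherever the Python loop terminates.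

-- shared fuel bound (a totality guard, not part of either algorithm)
def pvFuel (x_min : Int) (x_max : Int) (y_min : Int) (y_max : Int) : Nat :=
  ((y_max - y_min).toNat + 2) * ((x_max - x_min).toNat + 2)

-- ===== PORT A =====
-- A's while-True loop over the state (x, y, position), one fuel unit per yield.
def loopA (x_min : Int) (x_max : Int) (y_min : Int) (radius : Int) :
    Nat → Int → Int → String → List (Int × Int × String)
  | 0, _, _, _ => []
  | f+1, x, y, pos =>
    (x, y, pos) ::
    (if x ≥ x_max then
       -- 当前行点已超出范围，另起一行
       let next_y := y - radius * (if pos = "up" then 3 else 2)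
       if next_y ≤ y_min - 2 * radius then []
       else loopA x_min x_max y_min radius f x_min next_y "down"
     else if pos = "down" then loopA x_min x_max y_min radius f (x + radius) (y + radius) "up"
     else loopA x_min x_max y_min radius f (x + radius) (y - radius) "down")

def circle_generator (x_min : Int) (x_max : Int) (y_min : Int) (y_max : Int) (radius : Int) : List (Int × Int × String) :=
  loopA x_min x_max y_min radius (pvFuel x_min x_max y_min y_max) x_min (y_max - 1) "down"

-- ===== PORT B =====
-- B's inner column loop: yields (x, row_start(+radius), down/up by parity of k),
-- breaks after yielding once x ≥ x_max; returns the yielded points and the leftover fuel.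
def rowB (x_max : Int) (radius : Int) (row_start : Int) :
    Nat → Int → Nat → (List (Int × Int × String)) × Nat
  | 0, _, _ => ([], 0)
  | f+1, x, k =>
    let p := if k % 2 = 0 then (x, row_start, "down") else (x, row_start + radius, "up")
    if x ≥ x_max then ([p], f)
    else
      let rest := rowB x_max radius row_start f (x + radius) (k + 1)
      (p :: rest.1, rest.2)

-- used by outerB's termination proof
theorem rowB_snd_le (x_max : Int) (radius : Int) (row_start : Int) :
    ∀ (f : Nat) (x : Int) (k : Nat), (rowB x_max radius row_start f x k).2 ≤ f - 1 := by
  intro f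
  induction f with
  | zero => intro x k; simp [rowB]
  | succ f ih =>
    intro x k
    simp only [rowB]
    split <;> simp only []
    · omega
    · exact le_trans (ih (x + radius) (k + 1)) (by omega)

-- B's outer row loop: do-while over row_start, decrementing by 2*radius.
def outerB (x_min : Int) (x_max : Int) (y_min : Int) (radius : Int) (f : Nat) (row_start : Int) :
    List (Int × Int × String) :=
  if _h : f = 0 then []
  else
    let p := rowB x_max radius row_start f x_min 0
    p.1 ++ (if row_start ≤ y_min then []
            else outerB x_min x_max y_min radius p.2 (row_start - 2 * radius))
termination_by f
decreasing_by
  exact lt_of_le_of_lt (rowB_snd_le x_max radius row_start f x_min 0) (by omega)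

def circle_generator_alt (x_min : Int) (x_max : Int) (y_min : Int) (y_max : Int) (radius : Int) : List (Int × Int × String) :=
  outerB x_min x_max y_min radius (pvFuel x_min x_max y_min y_max) (y_max - 1)

-- ===== PRECONDITION & SPEC =====
def Spec_circle_generator (x_min : Int) (x_max : Int) (y_min : Int) (y_max : Int) (radius : Int) (out : List (Int × Int × String)) : Prop := out = circle_generator_alt x_min x_max y_min y_max radius
instance (x_min : Int) (x_max : Int) (y_min : Int) (y_max : Int) (radius : Int) (out : List (Int × Int × String)) : Decidable (Spec_circle_generator x_min x_max y_min y_max radius out) := by unfold Spec_circle_generator; infer_instance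

-- ===== CLAIM (what is proved, stated in full; the proofs are below) =====
def Claim_equal_circle_generator : Prop := ∀ (x_min : Int) (x_max : Int) (y_min : Int) (y_max : Int) (radius : Int), Dom_circle_generator x_min x_max y_min y_max radius → Spec_circle_generator x_min x_max y_min y_max radius (circle_generator x_min x_max y_min y_max radius)

-- ===== LEMMAS AND PROOFS =====

-- Mid-row simulation: from a state whose y and position are determined by the parity of the
-- column index k, A's flat loop yields exactly B's remaining row followed by A restarted on
-- the next row (with the fuel rowB left over), the restart guarded by row_start ≤ y_min.
theorem loopA_row (x_min : Int) (x_max : Int) (y_min : Int) (radius : Int) (row : Int) :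
    ∀ (f : Nat) (x : Int) (k : Nat),
      loopA x_min x_max y_min radius f x (row + if k % 2 = 1 then radius else 0)
        (if k % 2 = 0 then "down" else "up")
      = (rowB x_max radius row f x k).1 ++
        (if row ≤ y_min then []
         else loopA x_min x_max y_min radius (rowB x_max radius row f x k).2 x_min
                (row - 2 * radius) "down") := by
  intro f
  induction f with
  | zero =>
    intro x k
    simp only [loopA, rowB]
    split_ifs <;> rfl
  | succ f ih =>
    intro x k
    rcases Nat.mod_two_eq_zero_or_one k with hk | hk
    · -- k even: position 'down', y = row
      have hk1 : ¬ k % 2 = 1 := by omega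
      rw [if_neg hk1, if_pos hk, add_zero]
      by_cases hx : x ≥ x_max
      · have hA : loopA x_min x_max y_min radius (f+1) x row "down"
            = (x, row, "down") ::
              (if row - 2 * radius ≤ y_min - 2 * radius then []
               else loopA x_min x_max y_min radius f x_min (row - 2 * radius) "down") := by
          simp only [loopA]
          rw [if_pos hx, if_neg (by decide : ¬ ("down" : String) = "up"),
            show row - radius * 2 = row - 2 * radius from by ring]
        have hB : rowB x_max radius row (f+1) x k = ([(x, row, "down")], f) := by
          simp only [rowB]
          rw [if_pos hk, if_pos hx]
        rw [hA, hB]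
        simp only [List.singleton_append]
        congr 1
        by_cases hrow : row ≤ y_min
        · rw [if_pos (by omega : row - 2 * radius ≤ y_min - 2 * radius), if_pos hrow]
        · rw [if_neg (by omega : ¬ row - 2 * radius ≤ y_min - 2 * radius), if_neg hrow]
      · have hA : loopA x_min x_max y_min radius (f+1) x row "down"
            = (x, row, "down") :: loopA x_min x_max y_min radius f (x + radius) (row + radius) "up" := by
          simp only [loopA]
          rw [if_neg hx]
          simp
        have hB : rowB x_max radius row (f+1) x k
            = ((x, row, "down") :: (rowB x_max radius row f (x + radius) (k + 1)).1,
               (rowB x_max radius row f (x + radius) (k + 1)).2) := by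
          simp only [rowB]
          rw [if_pos hk, if_neg hx]
        have hI := ih (x + radius) (k + 1)
        rw [if_pos (by omega : (k + 1) % 2 = 1), if_neg (by omega : ¬ (k + 1) % 2 = 0)] at hI
        rw [hA, hI, hB]
        simp [List.cons_append]
    · -- k odd: position 'up', y = row + radius
      have hk0 : ¬ k % 2 = 0 := by omega
      rw [if_pos hk, if_neg hk0]
      by_cases hx : x ≥ x_max
      · have hA : loopA x_min x_max y_min radius (f+1) x (row + radius) "up"
            = (x, row + radius, "up") ::
              (if row - 2 * radius ≤ y_min - 2 * radius then []
               else loopA x_min x_max y_min radius f x_min (row - 2 * radius) "down") := by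
          simp only [loopA]
          rw [if_pos hx]
          simp only [if_true]
          rw [show row + radius - radius * 3 = row - 2 * radius from by ring]
        have hB : rowB x_max radius row (f+1) x k = ([(x, row + radius, "up")], f) := by
          simp only [rowB]
          rw [if_neg hk0, if_pos hx]
        rw [hA, hB]
        simp only [List.singleton_append]
        congr 1
        by_cases hrow : row ≤ y_min
        · rw [if_pos (by omega : row - 2 * radius ≤ y_min - 2 * radius), if_pos hrow]
        · rw [if_neg (by omega : ¬ row - 2 * radius ≤ y_min - 2 * radius), if_neg hrow]
      · have hA : loopA x_min x_max y_min radius (f+1) x (row + radius) "up"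
            = (x, row + radius, "up") :: loopA x_min x_max y_min radius f (x + radius) row "down" := by
          simp only [loopA]
          rw [if_neg hx, if_neg (by decide : ¬ ("up" : String) = "down"),
            show row + radius - radius = row from by ring]
        have hB : rowB x_max radius row (f+1) x k
            = ((x, row + radius, "up") :: (rowB x_max radius row f (x + radius) (k + 1)).1,
               (rowB x_max radius row f (x + radius) (k + 1)).2) := by
          simp only [rowB]
          rw [if_neg hk0, if_neg hx]
        have hI := ih (x + radius) (k + 1)
        rw [if_neg (by omega : ¬ (k + 1) % 2 = 1), if_pos (by omega : (k + 1) % 2 = 0), add_zero] at hI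
        rw [hA, hI, hB]
        simp [List.cons_append]

-- The outer correspondence: started at a row head, A's flat loop equals B's nested loops,
-- for every shared fuel value.
theorem loopA_eq_outerB (x_min : Int) (x_max : Int) (y_min : Int) (radius : Int) :
    ∀ (f : Nat) (row : Int),
      loopA x_min x_max y_min radius f x_min row "down"
        = outerB x_min x_max y_min radius f row := by
  intro f
  induction f using Nat.strong_induction_on with
  | _ f ih =>
    intro row
    match f with
    | 0 => simp [loopA, outerB]
    | f+1 =>
      rw [outerB]
      simp only [Nat.succ_ne_zero, dite_false]
      have h := loopA_row x_min x_max y_min radius row (f+1) x_min 0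
      rw [if_neg (by decide : ¬ (0 : Nat) % 2 = 1), if_pos (by decide : (0 : Nat) % 2 = 0),
        add_zero] at h
      rw [h]
      congr 1
      split_ifs with hrow
      · rfl
      · exact ih _ (lt_of_le_of_lt (rowB_snd_le x_max radius row (f+1) x_min 0) (by omega)) _

-- ===== VERDICT (by name: the statement is the Claim_ definition above) =====
theorem circle_generator_spec : Claim_equal_circle_generator := by
  intro x_min x_max y_min y_max radius _
  unfold Spec_circle_generator circle_generator circle_generator_alt
  exact loopA_eq_outerB x_min x_max y_min radius _ _
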